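-- pv_equiv track=rewrite | github.com/saagpatel/GithubRepoAuditor | src/portfolio_catalog.py | _normalize_defaults
-- ===== SOURCE A (Python) =====
-- from typing import Any
--
-- VALID_LIFECYCLE_STATES = {"active", "maintenance", "dormant", "experimental", "archived"}
--
-- VALID_CRITICALITY = {"low", "medium", "high", "critical"}
--
-- VALID_REVIEW_CADENCE = {"weekly", "monthly", "quarterly", "ad-hoc"}
--
-- VALID_CATEGORY_TAGS = {"commercial", "it-work", "vanity", "fun", "learning", "infrastructure"}
--
-- VALID_TOOL_PROVENANCE = {"claude-code", "codex", "gpt", "grok", "claude-ai", "unknown"}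
--
-- def _safe_text(value: Any) -> str:
--     return str(value or "").strip()
--
-- def _normalize_enum(value: Any, allowed: set[str]) -> str:
--     normalized = _safe_text(value).lower()
--     return normalized if normalized in allowed else ""
--
-- def _normalize_defaults(defaults: Any, errors: list[str]) -> dict[str, str]:
--     if not isinstance(defaults, dict):
--         if defaults:
--             errors.append("Portfolio catalog defaults must be a mapping.")
--         return {}
--
--     normalized = {
--         "lifecycle_state": _normalize_enum(defaults.get("lifecycle_state"), VALID_LIFECYCLE_STATES),
--         "criticality": _normalize_enum(defaults.get("criticality"), VALID_CRITICALITY),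
--         "review_cadence": _normalize_enum(defaults.get("review_cadence"), VALID_REVIEW_CADENCE),
--         "category": _normalize_enum(defaults.get("category"), VALID_CATEGORY_TAGS),
--         "tool_provenance": _normalize_enum(defaults.get("tool_provenance"), VALID_TOOL_PROVENANCE),
--         "maturity_program": _safe_text(defaults.get("maturity_program")).lower(),
--         "target_maturity": _safe_text(defaults.get("target_maturity")).lower(),
--     }
--     for key, allowed in (
--         ("lifecycle_state", VALID_LIFECYCLE_STATES),
--         ("criticality", VALID_CRITICALITY),
--         ("review_cadence", VALID_REVIEW_CADENCE),
--         ("category", VALID_CATEGORY_TAGS),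
--         ("tool_provenance", VALID_TOOL_PROVENANCE),
--     ):
--         raw_value = defaults.get(key)
--         if raw_value and not normalized[key]:
--             errors.append(
--                 f"Portfolio catalog defaults.{key} must be one of: {', '.join(sorted(allowed))}."
--             )
--     return {key: value for key, value in normalized.items() if value}
-- ===== SOURCE B (Python) =====
-- VALID_LIFECYCLE_STATES = {"active", "maintenance", "dormant", "experimental", "archived"}
-- VALID_CRITICALITY = {"low", "medium", "high", "critical"}
-- VALID_REVIEW_CADENCE = {"weekly", "monthly", "quarterly", "ad-hoc"}
-- VALID_CATEGORY_TAGS = {"commercial", "it-work", "vanity", "fun", "learning", "infrastructure"}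
-- VALID_TOOL_PROVENANCE = {"claude-code", "codex", "gpt", "grok", "claude-ai", "unknown"}
--
-- _FIELD_SPEC = (
--     ("lifecycle_state", VALID_LIFECYCLE_STATES),
--     ("criticality", VALID_CRITICALITY),
--     ("review_cadence", VALID_REVIEW_CADENCE),
--     ("category", VALID_CATEGORY_TAGS),
--     ("tool_provenance", VALID_TOOL_PROVENANCE),
--     ("maturity_program", None),
--     ("target_maturity", None),
-- )
--
-- def _normalize_defaults(defaults, errors):
--     if not isinstance(defaults, dict):
--         if defaults:
--             errors.append("Portfolio catalog defaults must be a mapping.")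
--         return {}
--     result = {}
--     for key, allowed in _FIELD_SPEC:
--         raw = defaults.get(key)
--         norm = str(raw or "").strip().lower()
--         if allowed is not None:
--             if norm not in allowed:
--                 norm = ""
--             if raw and not norm:
--                 errors.append(
--                     f"Portfolio catalog defaults.{key} must be one of: {', '.join(sorted(allowed))}."
--                 )
--         if norm:
--             result[key] = norm
--     return result
-- ===== Notes on version B (the rewrite author's own statement) =====
-- stated objective: simpler
-- what changed: Replaces A's three passes (build full normalized dict literal, separate error loop re-reading raws, final filtering comprehension) with one table-driven pass over a seven-entry field spec that normalizes, reports the error, and inserts non-empty values in a single loop.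
import Mathlib
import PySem

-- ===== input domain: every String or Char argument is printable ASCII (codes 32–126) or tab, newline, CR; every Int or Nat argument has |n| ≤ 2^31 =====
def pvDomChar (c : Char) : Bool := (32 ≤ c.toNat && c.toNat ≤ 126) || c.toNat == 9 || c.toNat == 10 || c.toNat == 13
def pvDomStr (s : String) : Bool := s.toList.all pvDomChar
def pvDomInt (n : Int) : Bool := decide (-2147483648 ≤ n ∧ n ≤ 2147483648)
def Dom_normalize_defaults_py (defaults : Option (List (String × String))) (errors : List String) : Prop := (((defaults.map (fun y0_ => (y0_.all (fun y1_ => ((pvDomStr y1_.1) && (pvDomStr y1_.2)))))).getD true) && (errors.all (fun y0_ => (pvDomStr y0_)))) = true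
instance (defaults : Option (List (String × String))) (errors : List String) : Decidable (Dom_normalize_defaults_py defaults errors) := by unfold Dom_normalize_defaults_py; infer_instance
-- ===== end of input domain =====

-- B is a single table-driven pass instead of A's three passes (dict literal, error loop, filter).
-- Both Pythons also append the same messages to `errors`; the theorems here are about the RETURN value only.

-- ===== PORT A =====
-- dict.get k (first-match lookup on the association list), then str(value or ""): missing key or "" both give ""
def pvRawGet (d : List (String × String)) (k : String) : String :=
  (((d.find? (fun kv => kv.1 == k)).map (fun kv => kv.2)).getD "")

-- _safe_text(value).strip()
def pvSafeText (v : String) : String := PySem.Str.strip v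

-- _normalize_enum
def pvNormEnum (v : String) (allowed : List String) : String :=
  let normalized := PySem.Str.lower (pvSafeText v)
  if normalized ∈ allowed then normalized else ""

def pvLifecycle : List String := ["active", "maintenance", "dormant", "experimental", "archived"]
def pvCriticality : List String := ["low", "medium", "high", "critical"]
def pvCadence : List String := ["weekly", "monthly", "quarterly", "ad-hoc"]
def pvCategory : List String := ["commercial", "it-work", "vanity", "fun", "learning", "infrastructure"]
def pvProvenance : List String := ["claude-code", "codex", "gpt", "grok", "claude-ai", "unknown"]

def normalize_defaults_py (defaults : Option (List (String × String))) (errors : List String) : List (String × String) :=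
  match defaults with
  | none => []   -- not a dict (and falsy): return {}; errors untouched
  | some d =>
    -- the `normalized` dict literal, in the same key order
    let normalized : List (String × String) :=
      [ ("lifecycle_state", pvNormEnum (pvRawGet d "lifecycle_state") pvLifecycle),
        ("criticality", pvNormEnum (pvRawGet d "criticality") pvCriticality),
        ("review_cadence", pvNormEnum (pvRawGet d "review_cadence") pvCadence),
        ("category", pvNormEnum (pvRawGet d "category") pvCategory),
        ("tool_provenance", pvNormEnum (pvRawGet d "tool_provenance") pvProvenance),
        ("maturity_program", PySem.Str.lower (pvSafeText (pvRawGet d "maturity_program"))),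
        ("target_maturity", PySem.Str.lower (pvSafeText (pvRawGet d "target_maturity"))) ]
    -- (the error-reporting loop only mutates `errors`, not the return value)
    normalized.filter (fun kv => kv.2 ≠ "")

-- ===== PORT B =====
-- the field-spec table: key, optional allowed set
def pvFieldSpec : List (String × Option (List String)) :=
  [ ("lifecycle_state", some pvLifecycle),
    ("criticality", some pvCriticality),
    ("review_cadence", some pvCadence),
    ("category", some pvCategory),
    ("tool_provenance", some pvProvenance),
    ("maturity_program", none),
    ("target_maturity", none) ]

-- the loop body's normalization of one field: lowercased stripped raw, restricted to the allowed set if any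
def pvNormField (d : List (String × String)) (spec : String × Option (List String)) : String :=
  let norm0 := PySem.Str.lower (PySem.Str.strip (pvRawGet d spec.1))
  match spec.2 with
  | some allowed => if norm0 ∈ allowed then norm0 else ""
  | none => norm0

def normalize_defaults_py_alt (defaults : Option (List (String × String))) (errors : List String) : List (String × String) :=
  match defaults with
  | none => []
  | some d =>
    pvFieldSpec.foldl (fun result spec =>
      if pvNormField d spec ≠ "" then result ++ [(spec.1, pvNormField d spec)] else result) []

-- ===== PRECONDITION & SPEC =====
def Spec_normalize_defaults_py (defaults : Option (List (String × String))) (errors : List String) (out : List (String × String)) : Prop := out = normalize_defaults_py_alt defaults errors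
instance (defaults : Option (List (String × String))) (errors : List String) (out : List (String × String)) : Decidable (Spec_normalize_defaults_py defaults errors out) := by unfold Spec_normalize_defaults_py; infer_instance

-- ===== CLAIM (what is proved, stated in full; the proofs are below) =====
def Claim_equal_normalize_defaults_py : Prop := ∀ (defaults : Option (List (String × String))) (errors : List String), Dom_normalize_defaults_py defaults errors → Spec_normalize_defaults_py defaults errors (normalize_defaults_py defaults errors)

-- ===== LEMMAS AND PROOFS =====

-- filter-after-map (A's shape) equals the single accumulating table pass (B's shape)
theorem pv_table_pass {α : Type} (specs : List α) (key : α → String) (norm : α → String) :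
    (specs.map (fun s => (key s, norm s))).filter (fun kv => kv.2 ≠ "") =
    specs.foldl (fun acc s => if norm s ≠ "" then acc ++ [(key s, norm s)] else acc) [] := by
  rw [PySem.List.foldl_append_ite (p := fun s => norm s ≠ "") (f := fun s => (key s, norm s))]
  simp [List.filter_map, Function.comp_def]

-- A on a dict: its seven-entry literal IS the spec table mapped through the per-field normalizer
theorem pvA_some (d : List (String × String)) (errors : List String) :
    normalize_defaults_py (some d) errors =
    (pvFieldSpec.map (fun s => (s.1, pvNormField d s))).filter (fun kv => kv.2 ≠ "") := rfl

theorem pvB_some (d : List (String × String)) (errors : List String) :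
    normalize_defaults_py_alt (some d) errors =
    pvFieldSpec.foldl (fun acc s => if pvNormField d s ≠ "" then acc ++ [(s.1, pvNormField d s)] else acc) [] := rfl

-- ===== VERDICT (by name: the statement is the Claim_ definition above) =====
theorem normalize_defaults_py_spec : Claim_equal_normalize_defaults_py := by
  intro defaults errors _
  unfold Spec_normalize_defaults_py
  cases defaults with
  | none => rfl
  | some d =>
    rw [pvA_some, pvB_some]
    exact pv_table_pass pvFieldSpec (fun s => s.1) (pvNormField d)
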